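-- pv_equiv track=rewrite | github.com/namel3ss-Ai/namel3ss | src/namel3ss/lang/public_api.py | is_public_module
-- ===== SOURCE A (Python) =====
-- from dataclasses import dataclass
-- from typing import Mapping
--
-- PUBLIC_API_SURFACE: Mapping[str, tuple[str, ...]] = {
--     "grammar": (
--         "namel3ss.parser",
--         "namel3ss.lexer",
--     ),
--     "manifest": (
--         "namel3ss.ui.manifest",
--         "namel3ss.ui.manifest.layout_schema",
--         "namel3ss.ui.manifest.actions",
--     ),
--     "runtime_contracts": (
--         "namel3ss.runtime.contracts",
--         "namel3ss.runtime.ui_api",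
--     ),
--     "plugin_api": (
--         "namel3ss.plugins.plugin_api",
--     ),
--     "cli": (
--         "namel3ss.cli.main",
--         "namel3ss.cli.build_command",
--         "namel3ss.cli.deploy_command",
--         "namel3ss.cli.create_mode",
--     ),
-- }
--
-- @dataclass(frozen=True)
-- class PublicApiDeclaration:
--     category: str
--     module_prefixes: tuple[str, ...]
--
--     def as_dict(self) -> dict[str, object]:
--         return {
--             "category": self.category,
--             "module_prefixes": list(self.module_prefixes),
--         }
--
-- def public_api_declarations() -> tuple[PublicApiDeclaration, ...]:
--     declarations = []
--     for category in sorted(PUBLIC_API_SURFACE.keys()):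
--         declarations.append(
--             PublicApiDeclaration(
--                 category=category,
--                 module_prefixes=tuple(sorted(PUBLIC_API_SURFACE[category])),
--             )
--         )
--     return tuple(declarations)
--
-- def normalize_module_name(module_name: str | None) -> str:
--     return str(module_name or "").strip()
--
-- def public_module_prefixes() -> tuple[str, ...]:
--     prefixes: list[str] = []
--     for declaration in public_api_declarations():
--         prefixes.extend(declaration.module_prefixes)
--     return tuple(sorted(set(prefixes)))
--
-- def is_public_module(module_name: str) -> bool:
--     module = normalize_module_name(module_name)
--     if not module:
--         return False
--     for prefix in public_module_prefixes():
--         if module == prefix or module.startswith(f"{prefix}."):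
--             return True
--     return False
-- ===== SOURCE B (Python) =====
-- # Single left-to-right pass over the module's characters: test each dotted
-- # ancestor (and finally the whole module) against a prefix set built once.
--
-- PUBLIC_API_SURFACE = {
--     "grammar": (
--         "namel3ss.parser",
--         "namel3ss.lexer",
--     ),
--     "manifest": (
--         "namel3ss.ui.manifest",
--         "namel3ss.ui.manifest.layout_schema",
--         "namel3ss.ui.manifest.actions",
--     ),
--     "runtime_contracts": (
--         "namel3ss.runtime.contracts",
--         "namel3ss.runtime.ui_api",
--     ),
--     "plugin_api": (
--         "namel3ss.plugins.plugin_api",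
--     ),
--     "cli": (
--         "namel3ss.cli.main",
--         "namel3ss.cli.build_command",
--         "namel3ss.cli.deploy_command",
--         "namel3ss.cli.create_mode",
--     ),
-- }
--
-- _PREFIXES = {p for mods in PUBLIC_API_SURFACE.values() for p in mods}
--
--
-- def is_public_module(module_name: str) -> bool:
--     module = str(module_name or "").strip()
--     if not module:
--         return False
--     acc = ""
--     for ch in module:
--         if ch == "." and acc in _PREFIXES:
--             return True
--         acc += ch
--     return acc in _PREFIXES
-- ===== Notes on version B (the rewrite author's own statement) =====
-- stated objective: alternative
-- what changed: Instead of scanning the fixed sorted prefix list and testing each with == / startswith, B makes a single left-to-right pass over the module's characters, testing each dotted ancestor (and finally the whole module) for membership in a prefix set built once from PUBLIC_API_SURFACE.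
import Mathlib
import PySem

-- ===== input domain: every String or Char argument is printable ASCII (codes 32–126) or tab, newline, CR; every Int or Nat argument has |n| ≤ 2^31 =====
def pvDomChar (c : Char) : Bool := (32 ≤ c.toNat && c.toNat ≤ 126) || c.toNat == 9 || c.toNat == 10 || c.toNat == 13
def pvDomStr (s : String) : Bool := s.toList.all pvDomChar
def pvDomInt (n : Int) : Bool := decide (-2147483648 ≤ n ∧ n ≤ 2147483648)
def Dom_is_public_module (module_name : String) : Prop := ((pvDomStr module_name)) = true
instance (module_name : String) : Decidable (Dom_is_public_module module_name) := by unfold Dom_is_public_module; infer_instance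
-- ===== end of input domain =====

-- B replaces A's scan of the fixed prefix list with 'startswith' by a single
-- left-to-right pass over the module's characters, testing each dotted ancestor
-- (and finally the whole module) against a prefix set built once (objective: alternative).

-- ===== PORT A =====
-- PUBLIC_API_SURFACE, in source insertion order
def pvSurfaceA : PySem.Dict (List Char) (List (List Char)) :=
  PySem.Dict.mk [
    ("grammar".toList, ["namel3ss.parser".toList, "namel3ss.lexer".toList]),
    ("manifest".toList, ["namel3ss.ui.manifest".toList, "namel3ss.ui.manifest.layout_schema".toList, "namel3ss.ui.manifest.actions".toList]),
    ("runtime_contracts".toList, ["namel3ss.runtime.contracts".toList, "namel3ss.runtime.ui_api".toList]),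
    ("plugin_api".toList, ["namel3ss.plugins.plugin_api".toList]),
    ("cli".toList, ["namel3ss.cli.main".toList, "namel3ss.cli.build_command".toList, "namel3ss.cli.deploy_command".toList, "namel3ss.cli.create_mode".toList])]

-- public_api_declarations(): pairs (category, sorted module_prefixes), categories sorted
def publicApiDeclarationsA : List (List Char × List (List Char)) :=
  (PySem.List.sorted pvSurfaceA.keys (fun k => k) false).foldl
    (fun decls category => decls ++ [(category, PySem.List.sorted (pvSurfaceA.getD category []) (fun p => p) false)]) []

-- public_module_prefixes(): tuple(sorted(set(prefixes)))
def publicModulePrefixesA : List (List Char) :=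
  PySem.List.sorted
    (PySem.Set.ofList (publicApiDeclarationsA.foldl (fun prefixes d => prefixes ++ d.2) []))
    (fun p => p) false

def is_public_module (module_name : String) : Bool :=
  let module := PySem.Chars.strip module_name.toList   -- normalize_module_name
  if module == [] then false
  else publicModulePrefixesA.any
    (fun p => module == p || PySem.Chars.startswith module (p ++ ['.']))

-- ===== PORT B =====
-- {p for mods in PUBLIC_API_SURFACE.values() for p in mods}
def pvPrefixSetB : PySem.Set (List Char) :=
  PySem.Set.ofList ((PySem.Dict.mk [
    ("grammar".toList, ["namel3ss.parser".toList, "namel3ss.lexer".toList]),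
    ("manifest".toList, ["namel3ss.ui.manifest".toList, "namel3ss.ui.manifest.layout_schema".toList, "namel3ss.ui.manifest.actions".toList]),
    ("runtime_contracts".toList, ["namel3ss.runtime.contracts".toList, "namel3ss.runtime.ui_api".toList]),
    ("plugin_api".toList, ["namel3ss.plugins.plugin_api".toList]),
    ("cli".toList, ["namel3ss.cli.main".toList, "namel3ss.cli.build_command".toList, "namel3ss.cli.deploy_command".toList, "namel3ss.cli.create_mode".toList])]
    : PySem.Dict (List Char) (List (List Char))).values.foldl (fun acc mods => acc ++ mods) [])

-- the character loop: acc grows, at each '.' the ancestor so far is tested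
def pvGoB (acc : List Char) : List Char → Bool
  | [] => PySem.Set.contains pvPrefixSetB acc
  | c :: rest =>
      if c == '.' && PySem.Set.contains pvPrefixSetB acc then true
      else pvGoB (acc ++ [c]) rest

def is_public_module_alt (module_name : String) : Bool :=
  let module := PySem.Chars.strip module_name.toList
  if module == [] then false
  else pvGoB [] module

-- ===== PRECONDITION & SPEC =====
def Spec_is_public_module (module_name : String) (out : Bool) : Prop := out = is_public_module_alt module_name
instance (module_name : String) (out : Bool) : Decidable (Spec_is_public_module module_name out) := by unfold Spec_is_public_module; infer_instance

-- ===== CLAIM (what is proved, stated in full; the proofs are below) =====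
def Claim_equal_is_public_module : Prop := ∀ (module_name : String), Dom_is_public_module module_name → Spec_is_public_module module_name (is_public_module module_name)

-- ===== LEMMAS AND PROOFS =====

-- the two constant collections hold the same prefixes
theorem pv_perm : publicModulePrefixesA.Perm pvPrefixSetB := by decide

theorem pv_mem_iff (q : List Char) :
    PySem.Set.contains pvPrefixSetB q = true ↔ q ∈ publicModulePrefixesA := by
  rw [PySem.Set.contains, List.contains_iff_mem]
  exact (pv_perm.mem_iff).symm

-- characterization of B's loop
theorem pvGoB_iff (rest acc : List Char) :
    pvGoB acc rest = true ↔
      (PySem.Set.contains pvPrefixSetB (acc ++ rest) = true ∨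
        ∃ u v, rest = u ++ '.' :: v ∧ PySem.Set.contains pvPrefixSetB (acc ++ u) = true) := by
  induction rest generalizing acc with
  | nil =>
    simp only [pvGoB, List.append_nil]
    constructor
    · exact Or.inl
    · rintro (h | ⟨u, v, huv, _⟩)
      · exact h
      · exact absurd huv (by simp)
  | cons c rs ih =>
    by_cases hc : (c == '.' && PySem.Set.contains pvPrefixSetB acc) = true
    · obtain ⟨hc1, hc2⟩ := Bool.and_eq_true_iff.mp hc
      refine iff_of_true (by simp [pvGoB]; exact Or.inl ⟨beq_iff_eq.mp hc1, List.contains_iff_mem.mp hc2⟩) (Or.inr ⟨[], rs, ?_, by simpa using hc2⟩)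
      simp [beq_iff_eq.mp hc1]
    · rw [Bool.not_eq_true] at hc
      simp only [pvGoB, hc, Bool.false_eq_true, if_false]
      rw [ih (acc ++ [c])]
      constructor
      · rintro (h | ⟨u, v, huv, hu⟩)
        · exact Or.inl (by simpa using h)
        · exact Or.inr ⟨c :: u, v, by rw [huv]; simp, by simpa using hu⟩
      · rintro (h | ⟨u, v, huv, hu⟩)
        · exact Or.inl (by simpa using h)
        · cases u with
          | nil =>
            simp only [List.nil_append, List.cons.injEq] at huv
            rw [List.append_nil] at hu
            simp [huv.1] at hc
            exact absurd (List.contains_iff_mem.mp hu) hc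
          | cons c' u' =>
            simp only [List.cons_append, List.cons.injEq] at huv
            obtain ⟨rfl, rfl⟩ := huv
            exact Or.inr ⟨u', v, rfl, by simpa using hu⟩

-- characterization of A's scan
theorem pvA_iff (m : List Char) :
    (publicModulePrefixesA.any
      (fun p => m == p || PySem.Chars.startswith m (p ++ ['.']))) = true ↔
      (m ∈ publicModulePrefixesA ∨
        ∃ u v, m = u ++ '.' :: v ∧ u ∈ publicModulePrefixesA) := by
  simp only [List.any_eq_true, Bool.or_eq_true, beq_iff_eq, PySem.Chars.startswith_iff]
  constructor
  · rintro ⟨p, hp, (rfl | hpre)⟩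
    · exact Or.inl hp
    · obtain ⟨t, ht⟩ := hpre
      exact Or.inr ⟨p, t, by rw [← ht]; simp, hp⟩
  · rintro (hm | ⟨u, v, rfl, hu⟩)
    · exact ⟨m, hm, Or.inl rfl⟩
    · exact ⟨u, hu, Or.inr ⟨v, by simp⟩⟩

-- ===== VERDICT (by name: the statement is the Claim_ definition above) =====
theorem is_public_module_spec : Claim_equal_is_public_module := by
  intro module_name _
  unfold Spec_is_public_module is_public_module is_public_module_alt
  set m := PySem.Chars.strip module_name.toList with hm
  by_cases h : m == []
  · simp [h]
  · simp only [h, if_false, Bool.false_eq_true]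
    rw [Bool.eq_iff_iff, pvA_iff, pvGoB_iff]
    simp only [List.nil_append]
    constructor
    · rintro (h1 | ⟨u, v, heq, hu⟩)
      · exact Or.inl ((pv_mem_iff m).mpr h1)
      · exact Or.inr ⟨u, v, heq, (pv_mem_iff u).mpr hu⟩
    · rintro (h1 | ⟨u, v, heq, hu⟩)
      · exact Or.inl ((pv_mem_iff m).mp h1)
      · exact Or.inr ⟨u, v, heq, (pv_mem_iff u).mp hu⟩
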